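-- pv_equiv track=rewrite | github.com/Sh-Kod/Server-Neustart | cinema_projector/error_codes.py | decode_barco_bitmask
-- ===== SOURCE A (Python) =====
-- def decode_barco_bitmask(
--     value: int,
--     table: dict[int, tuple[str, str]],
--     max_bits: int = 32,
-- ) -> list[str]:
--     """
--     Dekodiert einen Barco-Bitmask-Wert anhand der Tabelle.
--     Gibt eine Liste von Beschreibungsstrings zurück.
--     Unbekannte Bits werden als "Bit N (0xXXXXXXXX)" ausgegeben.
--     """
--     if value == 0:
--         return []
--     results = []
--     for bit in range(max_bits):
--         if not (value & (1 << bit)):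
--             continue
--         if bit in table:
--             code, desc = table[bit]
--             results.append(f"{code}: {desc}")
--         else:
--             results.append(f"Bit {bit} (0x{1 << bit:08X}) – unbekannter Code")
--     return results
-- ===== SOURCE B (Python) =====
-- def decode_barco_bitmask(
--     value: int,
--     table: dict[int, tuple[str, str]],
--     max_bits: int = 32,
-- ) -> list[str]:
--     """Decode by recursing on the masked value itself (halving), not by scanning a fixed bit range."""
--     def go(v: int, bit: int) -> list[str]:
--         if v == 0:
--             return []
--         rest = go(v >> 1, bit + 1)
--         if v & 1:
--             if bit in table:
--                 code, desc = table[bit]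
--                 return [f"{code}: {desc}"] + rest
--             return [f"Bit {bit} (0x{1 << bit:08X}) – unbekannter Code"] + rest
--         return rest
--     return go(value & ((1 << max(max_bits, 0)) - 1), 0)
-- ===== Notes on version B (the rewrite author's own statement) =====
-- stated objective: alternative
-- what changed: Instead of scanning every bit index in range(max_bits) and testing value & (1 << bit), B masks value to the low max_bits bits once and recurses on the masked value itself (emit bit if v & 1, continue with v >> 1), so the loop is driven by the value's bits and stops at its highest set bit.
import Mathlib
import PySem

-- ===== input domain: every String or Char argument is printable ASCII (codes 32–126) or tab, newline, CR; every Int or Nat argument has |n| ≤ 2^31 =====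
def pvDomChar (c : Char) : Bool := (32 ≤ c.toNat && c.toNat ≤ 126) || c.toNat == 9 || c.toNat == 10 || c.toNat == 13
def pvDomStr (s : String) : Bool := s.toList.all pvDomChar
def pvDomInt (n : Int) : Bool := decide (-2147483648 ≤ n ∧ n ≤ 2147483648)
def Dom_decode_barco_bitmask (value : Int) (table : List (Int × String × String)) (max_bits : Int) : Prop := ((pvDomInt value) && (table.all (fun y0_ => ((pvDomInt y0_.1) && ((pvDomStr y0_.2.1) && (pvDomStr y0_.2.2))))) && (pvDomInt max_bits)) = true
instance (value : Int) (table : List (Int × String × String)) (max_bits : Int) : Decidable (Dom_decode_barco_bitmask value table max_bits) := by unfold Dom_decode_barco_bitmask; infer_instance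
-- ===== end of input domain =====

-- B replaces A's scan of the fixed bit range 0..max_bits-1 by a recursion on the masked value
-- itself (halving it, stopping when it is 0); objective: alternative algorithm, same results.

-- shared formatting helper: f"{n:08X}" for n ≥ 0 (exact: uppercase hex, '0'-padded to width 8)
def pyHexDigit (d : Nat) : Char := if d < 10 then Char.ofNat (48 + d) else Char.ofNat (55 + d)

def pyHexChars (n : Nat) : List Char :=
  if n = 0 then [] else pyHexChars (n / 16) ++ [pyHexDigit (n % 16)]
decreasing_by exact Nat.div_lt_self (Nat.pos_of_ne_zero (by assumption)) (by norm_num)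

def pyHex08X (n : Nat) : String :=
  let ds := if n = 0 then ['0'] else pyHexChars n
  String.ofList (List.replicate (8 - ds.length) '0' ++ ds)

-- ===== PORT A =====
-- literal port of A: early return on value == 0, then a fold over range(max_bits),
-- skipping unset bits ('continue'), looking the bit up in the table (dict = first match).
-- '1 << bit' is ported as '(1 : Int) <<< bit.toNat' (exact: bit ∈ range(max_bits) is ≥ 0).
def decode_barco_bitmask (value : Int) (table : List (Int × String × String)) (max_bits : Int) : List String :=
  if value = 0 then []
  else
    (PySem.List.pyRange 0 max_bits 1).foldl (fun results bit =>
      if PySem.Int.band value ((1 : Int) <<< bit.toNat) = 0 then results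
      else
        match table.find? (fun p => p.1 == bit) with
        | some (_, code, desc) => results ++ [code ++ ": " ++ desc]
        | none => results ++ ["Bit " ++ PySem.Int.toStr bit ++ " (0x" ++ pyHex08X (2 ^ bit.toNat) ++ ") – unbekannter Code"]) []

-- ===== PORT B =====
-- literal port of Source B's recursive helper go(v, bit): v is a Nat (the masked value is ≥ 0)
def altGo (table : List (Int × String × String)) (v : Nat) (bit : Nat) : List String :=
  if _h : v = 0 then []
  else
    let rest := altGo table (v >>> 1) (bit + 1)
    if v &&& 1 = 1 then
      match table.find? (fun p => p.1 == (bit : Int)) with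
      | some (_, code, desc) => (code ++ ": " ++ desc) :: rest
      | none => ("Bit " ++ PySem.Int.toStr (bit : Int) ++ " (0x" ++ pyHex08X (2 ^ bit) ++ ") – unbekannter Code") :: rest
    else rest
termination_by v
decreasing_by
  have h2 : v >>> 1 = v / 2 := Nat.shiftRight_one v
  rw [h2]
  exact Nat.div_lt_self (Nat.pos_of_ne_zero (by assumption)) (by norm_num)

def decode_barco_bitmask_alt (value : Int) (table : List (Int × String × String)) (max_bits : Int) : List String :=
  altGo table (PySem.Int.band value (((1 : Int) <<< (max max_bits 0).toNat) - 1)).toNat 0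

-- ===== PRECONDITION & SPEC =====
def Spec_decode_barco_bitmask (value : Int) (table : List (Int × String × String)) (max_bits : Int) (out : List String) : Prop := out = decode_barco_bitmask_alt value table max_bits
instance (value : Int) (table : List (Int × String × String)) (max_bits : Int) (out : List String) : Decidable (Spec_decode_barco_bitmask value table max_bits out) := by unfold Spec_decode_barco_bitmask; infer_instance

-- ===== CLAIM (what is proved, stated in full; the proofs are below) =====
def Claim_equal_decode_barco_bitmask : Prop := ∀ (value : Int) (table : List (Int × String × String)) (max_bits : Int), Dom_decode_barco_bitmask value table max_bits → Spec_decode_barco_bitmask value table max_bits (decode_barco_bitmask value table max_bits)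

-- ===== LEMMAS AND PROOFS =====

-- the string both programs emit for a set bit b (lookup = first match, as in both ports)
def entryStr (table : List (Int × String × String)) (b : Nat) : String :=
  match table.find? (fun p => p.1 == (b : Int)) with
  | some (_, code, desc) => code ++ ": " ++ desc
  | none => "Bit " ++ PySem.Int.toStr (b : Int) ++ " (0x" ++ pyHex08X (2 ^ b) ++ ") – unbekannter Code"

-- (a &&& b) + ldiff a b = a : the bits of a split into those shared with b and the rest
theorem and_add_ldiff (m n : Nat) : (m &&& n) + Nat.ldiff m n = m := by
  induction m using Nat.strong_induction_on generalizing n with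
  | _ m ih =>
    rcases Nat.eq_zero_or_pos m with hm | hm
    · subst hm
      have h1 : (0 &&& n) = 0 := by simp
      have h2 : Nat.ldiff 0 n = 0 := Nat.eq_of_testBit_eq (by simp [Nat.testBit_ldiff])
      simp [h1, h2]
    · have ihh := ih (m / 2) (Nat.div_lt_self hm (by norm_num)) (n / 2)
      have hdiv : (m &&& n) / 2 = m / 2 &&& n / 2 := Nat.and_div_two
      have hldiv : Nat.ldiff m n / 2 = Nat.ldiff (m / 2) (n / 2) := by
        apply Nat.eq_of_testBit_eq
        intro i
        rw [Nat.testBit_div_two, Nat.testBit_ldiff, Nat.testBit_ldiff,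
          Nat.testBit_div_two, Nat.testBit_div_two]
      have hmod1 : (m &&& n) % 2 = if m % 2 = 1 ∧ n % 2 = 1 then 1 else 0 := by
        have := Nat.testBit_and m n 0
        simp only [Nat.testBit_zero] at this
        rcases Nat.mod_two_eq_zero_or_one (m &&& n) with h | h <;>
          rcases Nat.mod_two_eq_zero_or_one m with h1 | h1 <;>
          rcases Nat.mod_two_eq_zero_or_one n with h2 | h2 <;>
          simp [h, h1, h2] at this ⊢
      have hmod2 : Nat.ldiff m n % 2 = if m % 2 = 1 ∧ n % 2 = 0 then 1 else 0 := by
        have := Nat.testBit_ldiff m n 0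
        simp only [Nat.testBit_zero] at this
        rcases Nat.mod_two_eq_zero_or_one (Nat.ldiff m n) with h | h <;>
          rcases Nat.mod_two_eq_zero_or_one m with h1 | h1 <;>
          rcases Nat.mod_two_eq_zero_or_one n with h2 | h2 <;>
          simp [h, h1, h2] at this ⊢
      have hfin : (m &&& n) % 2 + Nat.ldiff m n % 2 = m % 2 := by
        rcases Nat.mod_two_eq_zero_or_one m with h1 | h1 <;>
          rcases Nat.mod_two_eq_zero_or_one n with h2 | h2 <;>
          simp [hmod1, hmod2, h1, h2]
      have key : (m &&& n) / 2 + Nat.ldiff m n / 2 = m / 2 := by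
        rw [hdiv, hldiv]; exact ihh
      omega

theorem sub_and_eq_ldiff (m n : Nat) : m - (m &&& n) = Nat.ldiff m n := by
  have := and_add_ldiff m n; omega

-- band with a Nat on the right is a Nat whose bits are the pairwise ANDs (Python-exact on negatives)
theorem band_natCast_right (a : Int) (m : Nat) :
    PySem.Int.band a (m : Int) = ((if 0 ≤ a then a.toNat &&& m else Nat.ldiff m (-a - 1).toNat : Nat) : Int) := by
  by_cases h : 0 ≤ a
  · rw [if_pos h, PySem.Int.band_of_nonneg h (by positivity)]
    simp
  · simp only [PySem.Int.band, h, if_false, if_pos (by positivity : (0:Int) ≤ (m:Int)), Int.toNat_natCast]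
    rw [sub_and_eq_ldiff]

theorem band_natCast_nonneg (a : Int) (m : Nat) : 0 ≤ PySem.Int.band a (m : Int) := by
  rw [band_natCast_right]; positivity

theorem testBit_band_natCast (a : Int) (m i : Nat) :
    ((PySem.Int.band a (m : Int)).toNat).testBit i = (a.testBit i && m.testBit i) := by
  rw [band_natCast_right]
  rcases a with k | k
  · simp [Int.testBit, Nat.testBit_and]
  · have hneg : ¬ (0 : Int) ≤ Int.negSucc k := by omega
    have hk : (-(Int.negSucc k) - 1).toNat = k := by
      simp [Int.negSucc_eq]
    simp [hneg, Nat.testBit_ldiff, Int.testBit, Bool.and_comm]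


-- the bit-test in A: value & (1 << b) == 0 iff bit b of value is clear
theorem band_two_pow_eq_zero_iff (a : Int) (b : Nat) :
    PySem.Int.band a (((2 : Nat) ^ b : Nat) : Int) = 0 ↔ a.testBit b = false := by
  have hnn := band_natCast_nonneg a (2 ^ b)
  set X := (PySem.Int.band a (((2 : Nat) ^ b : Nat) : Int)).toNat with hX
  have hcast : PySem.Int.band a (((2 : Nat) ^ b : Nat) : Int) = (X : Int) := (Int.toNat_of_nonneg hnn).symm
  have hXval : X = if a.testBit b then 2 ^ b else 0 := by
    apply Nat.eq_of_testBit_eq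
    intro i
    rw [hX, testBit_band_natCast, Nat.testBit_two_pow]
    by_cases hib : b = i
    · subst hib; cases h : a.testBit b <;> simp
    · cases h : a.testBit b <;> simp [hib]
  rw [hcast]
  cases h : a.testBit b
  · simp [hXval, h]
  · simp [hXval, h]

-- the masked value in B: its bits are value's bits below n
theorem testBit_masked (value : Int) (n b : Nat) :
    ((PySem.Int.band value (((2 ^ n - 1 : Nat) : Nat) : Int)).toNat).testBit b
      = (decide (b < n) && value.testBit b) := by
  rw [testBit_band_natCast, Nat.testBit_two_pow_sub_one, Bool.and_comm]

theorem masked_lt (value : Int) (n : Nat) :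
    (PySem.Int.band value (((2 ^ n - 1 : Nat) : Nat) : Int)).toNat < 2 ^ n := by
  have hbits : ∀ i, n ≤ i →
      ((PySem.Int.band value (((2 ^ n - 1 : Nat) : Nat) : Int)).toNat).testBit i = false := by
    intro i hi
    rw [testBit_masked]
    simp [Nat.not_lt.mpr hi]
  have hmod : (PySem.Int.band value (((2 ^ n - 1 : Nat) : Nat) : Int)).toNat
      = (PySem.Int.band value (((2 ^ n - 1 : Nat) : Nat) : Int)).toNat % 2 ^ n := by
    rw [← Nat.and_two_pow_sub_one_eq_mod]
    apply Nat.eq_of_testBit_eq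
    intro i
    rw [Nat.testBit_and, Nat.testBit_two_pow_sub_one]
    rcases Nat.lt_or_ge i n with h | h
    · simp [h]
    · rw [hbits i h]
      simp
  rw [hmod]
  exact Nat.mod_lt _ (by positivity)

-- unfolding equations for altGo
theorem altGo_zero (table : List (Int × String × String)) (bit : Nat) : altGo table 0 bit = [] := by
  rw [altGo]; simp

theorem altGo_pos (table : List (Int × String × String)) (v bit : Nat) (hv : v ≠ 0) :
    altGo table v bit =
      (if v % 2 = 1 then entryStr table bit :: altGo table (v / 2) (bit + 1)
       else altGo table (v / 2) (bit + 1)) := by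
  rw [altGo]
  simp only [hv, dite_false, Nat.shiftRight_one, Nat.and_one_is_mod, entryStr]
  rcases h : table.find? (fun p => p.1 == (bit : Int)) with _ | ⟨_, code, desc⟩ <;> simp [h]

-- the main loop correspondence: folding A's per-bit body over range k equals B's recursion,
-- for any v < 2^k, with j the absolute index of v's bit 0
theorem fold_eq_altGo (table : List (Int × String × String)) :
    ∀ (k : Nat) (v : Nat), v < 2 ^ k → ∀ (j : Nat),
      (List.range k).foldl
        (fun acc i => if v.testBit i then acc ++ [entryStr table (j + i)] else acc) []
      = altGo table v j := by
  intro k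
  induction k with
  | zero =>
    intro v hv j
    interval_cases v
    simp [altGo_zero]
  | succ k ih =>
    intro v hv j
    rcases Nat.eq_zero_or_pos v with h0 | h0
    · subst h0
      rw [altGo_zero]
      simp [Nat.zero_testBit]
    · have hv2 : v / 2 < 2 ^ k := by
        have : v < 2 ^ k * 2 := by rw [← pow_succ]; exact hv
        omega
      rw [altGo_pos table v j (by omega : v ≠ 0)]
      rw [List.range_succ_eq_map, List.foldl_cons, List.foldl_map]
      have hshift : ∀ (acc : List String),
          (List.range k).foldl
            (fun acc i => if v.testBit (i + 1) then acc ++ [entryStr table (j + (i + 1))] else acc) acc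
          = acc ++ altGo table (v / 2) (j + 1) := by
        intro acc
        have hcongr : (List.range k).foldl
            (fun acc i => if v.testBit (i + 1) then acc ++ [entryStr table (j + (i + 1))] else acc) acc
          = (List.range k).foldl
            (fun acc i => if (v / 2).testBit i then acc ++ [entryStr table ((j + 1) + i)] else acc) acc := by
          apply PySem.List.foldl_congr_mem
          intro a i _
          rw [Nat.testBit_succ]
          have : j + (i + 1) = (j + 1) + i := by omega
          rw [this]
        rw [hcongr, PySem.List.foldl_append_if, ← ih (v / 2) hv2 (j + 1),
          PySem.List.foldl_append_if]
        simp
      have hbit0 : v.testBit 0 = decide (v % 2 = 1) := Nat.testBit_zero v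
      rcases Nat.mod_two_eq_zero_or_one v with hm | hm
      · rw [hbit0]
        simp only [hm]
        norm_num
        rw [hshift]
        simp
      · rw [hbit0]
        simp only [hm]
        norm_num
        rw [hshift]
        simp

-- ===== VERDICT (by name: the statement is the Claim_ definition above) =====
theorem shift_one_eq (k : Nat) : ((1 : Int) <<< k) = ((2 ^ k : Nat) : Int) := by
  simp [Int.shiftLeft_eq]

theorem mask_cast (n : Nat) : ((1 : Int) <<< n) - 1 = ((2 ^ n - 1 : Nat) : Int) := by
  rw [shift_one_eq]
  have := Nat.one_le_two_pow (n := n)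
  push_cast [this]
  ring

theorem decode_barco_bitmask_spec : Claim_equal_decode_barco_bitmask := by
  intro value table max_bits _
  show decode_barco_bitmask value table max_bits = decode_barco_bitmask_alt value table max_bits
  set n := max_bits.toNat with hn
  have hmax : (max max_bits 0).toNat = n := by omega
  rw [decode_barco_bitmask_alt, hmax, mask_cast n]
  set M := (PySem.Int.band value (((2 ^ n - 1 : Nat) : Nat) : Int)).toNat with hM
  by_cases h0 : value = 0
  · subst h0
    have : M = 0 := by
      rw [hM, band_natCast_right]
      simp
    rw [this, altGo_zero, decode_barco_bitmask]
    simp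
  · rw [decode_barco_bitmask, if_neg h0, PySem.List.pyRange_one]
    simp only [Int.sub_zero, List.foldl_map, zero_add, ← hn]
    refine Eq.trans ?_ (fold_eq_altGo table n M (masked_lt value n) 0)
    apply PySem.List.foldl_congr_mem
    intro acc i hi
    have hi' : i < n := List.mem_range.mp hi
    have h1 : PySem.Int.band value ((1 : Int) <<< ((i : Nat) : Int)) = 0 ↔ value.testBit i = false := by
      rw [Int.one_shiftLeft]
      exact band_two_pow_eq_zero_iff value i
    have h2 : M.testBit i = value.testBit i := by
      rw [hM, testBit_masked]
      simp [hi']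
    simp only [Int.toNat_natCast, Nat.zero_add]
    cases hv : value.testBit i
    · rw [if_pos (h1.mpr hv), if_neg (by simp [h2, hv])]
    · rw [if_neg (by simp [h1, hv]), if_pos (by simp [h2, hv])]
      rw [entryStr]
      rcases hf : table.find? (fun p => p.1 == ((i : Nat) : Int)) with _ | ⟨_, code, desc⟩ <;> simp [hf]
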